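-- pv_equiv track=rewrite | github.com/thatnoobles/advent-of-code-2025 | 04/04_2.py | remove_rolls
-- ===== SOURCE A (Python) =====
-- def remove_rolls(grid: list[str], rolls: list[tuple]):
--     result = []
--     for y in range(len(grid)):
--         new_row = ""
--         for x in range(len(grid[y])):
--             if grid[y][x] == "." or (x, y) in rolls:
--                 new_row += "."
--             else:
--                 new_row += "@"
--         result.append(new_row)
--     return result
-- ===== SOURCE B (Python) =====
-- def remove_rolls(grid: list[str], rolls: list[tuple]):
--     # Build the floor mask in one pass, then patch each roll coordinate.
--     result = [['.' if c == '.' else '@' for c in row] for row in grid]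
--     for x, y in rolls:
--         if 0 <= y < len(result) and 0 <= x < len(result[y]):
--             result[y][x] = '.'
--     return [''.join(row) for row in result]
-- ===== Notes on version B (the rewrite author's own statement) =====
-- stated objective: faster
-- what changed: Instead of testing '(x, y) in rolls' for every grid cell (a linear scan of rolls per cell), B builds the '.'/'@' mask in one pass over the grid and then patches each in-bounds roll coordinate directly.
import Mathlib
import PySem

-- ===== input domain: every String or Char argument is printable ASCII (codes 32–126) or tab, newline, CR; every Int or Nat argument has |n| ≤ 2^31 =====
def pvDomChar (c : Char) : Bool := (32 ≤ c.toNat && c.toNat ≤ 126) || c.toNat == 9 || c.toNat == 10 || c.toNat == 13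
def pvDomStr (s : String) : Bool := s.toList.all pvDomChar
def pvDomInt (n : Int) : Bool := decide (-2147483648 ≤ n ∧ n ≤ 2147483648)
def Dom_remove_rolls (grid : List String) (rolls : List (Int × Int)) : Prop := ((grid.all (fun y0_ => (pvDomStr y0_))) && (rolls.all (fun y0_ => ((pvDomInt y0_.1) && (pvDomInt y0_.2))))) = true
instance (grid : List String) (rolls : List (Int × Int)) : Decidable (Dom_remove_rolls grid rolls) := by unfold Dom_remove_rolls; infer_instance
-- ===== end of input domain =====

-- B replaces the per-cell membership scan of rolls by one mask pass over the grid
-- plus direct patching of each in-bounds roll coordinate (objective: faster).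

-- ===== PORT A =====
def remove_rolls (grid : List String) (rolls : List (Int × Int)) : List String :=
  (PySem.List.pyRange 0 (grid.length : Int) 1).foldl (fun result y =>
    let row := (PySem.List.pyGetD grid y "").toList
    result ++ [String.mk ((PySem.List.pyRange 0 (row.length : Int) 1).foldl (fun new_row x =>
      new_row ++ [if PySem.List.pyGetD row x '?' = '.' ∨ (x, y) ∈ rolls then '.' else '@']) [])]) []

-- ===== PORT B =====
-- one patch step of B's loop: set result[y][x] := '.' when the coordinate is in bounds
def pvPatch (res : List (List Char)) (p : Int × Int) : List (List Char) :=
  if 0 ≤ p.2 ∧ p.2 < (res.length : Int) ∧ 0 ≤ p.1 ∧ p.1 < ((res.getD p.2.toNat []).length : Int) then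
    res.set p.2.toNat ((res.getD p.2.toNat []).set p.1.toNat '.')
  else res

def remove_rolls_alt (grid : List String) (rolls : List (Int × Int)) : List String :=
  let base := grid.map (fun row => row.toList.map (fun c => if c = '.' then '.' else '@'))
  (rolls.foldl pvPatch base).map String.mk

-- ===== PRECONDITION & SPEC =====
def Spec_remove_rolls (grid : List String) (rolls : List (Int × Int)) (out : List String) : Prop := out = remove_rolls_alt grid rolls
instance (grid : List String) (rolls : List (Int × Int)) (out : List String) : Decidable (Spec_remove_rolls grid rolls out) := by unfold Spec_remove_rolls; infer_instance

-- ===== CLAIM (what is proved, stated in full; the proofs are below) =====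
def Claim_equal_remove_rolls : Prop := ∀ (grid : List String) (rolls : List (Int × Int)), Dom_remove_rolls grid rolls → Spec_remove_rolls grid rolls (remove_rolls grid rolls)

-- ===== LEMMAS AND PROOFS =====

-- canonical description of the result cells after the rolls in `done` have been applied
def pvCell (grid : List String) (done : List (Int × Int)) (y x : Nat) : Char :=
  if (grid.getD y "").toList.getD x '?' = '.' ∨ ((x : Int), (y : Int)) ∈ done then '.' else '@'

def pvCanon (grid : List String) (done : List (Int × Int)) : List (List Char) :=
  (List.range grid.length).map (fun y =>
    (List.range (grid.getD y "").toList.length).map (pvCell grid done y))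

theorem pvCanon_base (grid : List String) :
    grid.map (fun row => row.toList.map (fun c => if c = '.' then '.' else '@')) = pvCanon grid [] := by
  apply List.ext_getElem (by simp [pvCanon])
  intro y hy hy'
  have hyg : y < grid.length := by simpa using hy
  simp only [pvCanon, List.getElem_map, List.getElem_range, List.getD_eq_getElem?_getD,
    List.getElem?_eq_getElem hyg, Option.getD_some]
  apply List.ext_getElem (by simp)
  intro x hx hx'
  have hxg : x < grid[y].toList.length := by simpa using hx
  simp only [List.getElem_map, List.getElem_range, pvCell, List.getD_eq_getElem?_getD,
    List.getElem?_eq_getElem hyg, List.getElem?_eq_getElem hxg, Option.getD_some,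
    List.not_mem_nil, or_false]

theorem pvPatch_canon (grid : List String) (done : List (Int × Int)) (p : Int × Int) :
    pvPatch (pvCanon grid done) p = pvCanon grid (done ++ [p]) := by
  obtain ⟨px, py⟩ := p
  unfold pvPatch
  split_ifs with h
  · -- in-bounds patch: set (py, px) to '.'
    simp only [pvCanon, List.length_map, List.length_range] at h ⊢
    obtain ⟨hy0, hylt, hx0, hxlt⟩ := h
    apply List.ext_getElem (by simp)
    intro y hy hy'
    simp only [List.length_map, List.length_range] at hy hy'
    by_cases hyy : y = py.toNat
    · subst hyy
      rw [List.getElem_set_self (by simpa using hy)]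
      have hget : ((List.range grid.length).map (fun y =>
          (List.range (grid.getD y "").toList.length).map (pvCell grid done y))).getD py.toNat []
          = (List.range (grid.getD py.toNat "").toList.length).map (pvCell grid done py.toNat) := by
        rw [List.getD_eq_getElem _ _ (by simpa using hy)]
        simp
      rw [hget] at hxlt ⊢
      apply List.ext_getElem (by simp)
      intro x hx hx'
      simp only [List.length_map, List.length_range] at hx
      by_cases hxx : x = px.toNat
      · subst hxx
        rw [List.getElem_set_self (by simpa using hx)]
        simp only [List.getElem_map, List.getElem_range, pvCell]
        rw [if_pos]
        right
        simp [Int.toNat_of_nonneg hx0, Int.toNat_of_nonneg hy0]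
      · rw [List.getElem_set_ne (by simpa using (Ne.symm hxx))]
        simp only [List.getElem_map, List.getElem_range, pvCell]
        have : (((x : Int), ((py.toNat : Nat) : Int)) ∈ done ++ [(px, py)]) ↔ (((x : Int), ((py.toNat : Nat) : Int)) ∈ done) := by
          simp only [List.mem_append, List.mem_singleton, Prod.mk.injEq]
          constructor
          · rintro (h | ⟨h1, h2⟩)
            · exact h
            · exfalso; apply hxx; omega
          · exact Or.inl
        simp only [this]
    · rw [List.getElem_set_ne (by simpa using (fun he => hyy he.symm))]
      simp only [List.getElem_map, List.getElem_range]
      apply List.ext_getElem (by simp)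
      intro x hx hx'
      simp only [List.length_range] at hx
      simp only [List.getElem_map, List.getElem_range, pvCell]
      have : (((x : Int), (y : Int)) ∈ done ++ [(px, py)]) ↔ (((x : Int), (y : Int)) ∈ done) := by
        simp only [List.mem_append, List.mem_singleton, Prod.mk.injEq]
        constructor
        · rintro (h | ⟨h1, h2⟩)
          · exact h
          · exfalso; apply hyy; omega
        · exact Or.inl
      simp only [this]
  · -- out of bounds: no cell has coordinates (px, py), so nothing changes
    simp only [pvCanon, List.length_map, List.length_range] at h ⊢
    apply List.ext_getElem (by simp)
    intro y hy hy'
    simp only [List.length_map, List.length_range] at hy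
    simp only [List.getElem_map, List.getElem_range]
    apply List.ext_getElem (by simp)
    intro x hx hx'
    simp only [List.length_range] at hx
    simp only [List.getElem_map, List.getElem_range, pvCell]
    have hmem : (((x : Int), (y : Int)) ∈ done ++ [(px, py)]) ↔ (((x : Int), (y : Int)) ∈ done) := by
      simp only [List.mem_append, List.mem_singleton, Prod.mk.injEq]
      constructor
      · rintro (hm | ⟨h1, h2⟩)
        · exact hm
        · exfalso
          apply h
          refine ⟨by omega, by omega, by omega, ?_⟩
          have hy2 : py.toNat < grid.length := by omega
          rw [List.getD_eq_getElem _ _ (by simpa using hy2)]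
          simp only [List.getElem_map, List.getElem_range, List.length_map, List.length_range]
          have hpy : py.toNat = y := by omega
          rw [hpy]
          simp only [List.length_map, List.length_range] at hx
          omega
      · exact Or.inl
    simp only [hmem]

theorem pvFold_canon (grid : List String) (rolls done : List (Int × Int)) :
    rolls.foldl pvPatch (pvCanon grid done) = pvCanon grid (done ++ rolls) := by
  induction rolls generalizing done with
  | nil => simp
  | cons p ps ih =>
    simp only [List.foldl_cons, pvPatch_canon]
    rw [ih]
    simp

theorem remove_rolls_canon (grid : List String) (rolls : List (Int × Int)) :
    remove_rolls grid rolls = (pvCanon grid rolls).map String.mk := by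
  unfold remove_rolls
  rw [PySem.List.foldl_append_singleton_eq_map]
  simp only [List.nil_append, pvCanon, List.map_map]
  rw [PySem.List.pyRange_zero_natCast]
  rw [List.map_map]
  apply List.ext_getElem (by simp)
  intro y hy hy'
  simp only [List.length_map, List.length_range] at hy
  simp only [List.getElem_map, List.getElem_range, Function.comp]
  rw [PySem.List.foldl_append_singleton_eq_map]
  simp only [List.nil_append]
  congr 1
  rw [PySem.List.pyRange_zero_natCast, List.map_map]
  apply List.ext_getElem (by simp)
  intro x hx hx'
  simp only [List.length_map, List.length_range] at hx
  simp only [List.getElem_map, List.getElem_range, Function.comp, pvCell]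
  simp [PySem.List.pyGetD_natCast]

-- ===== VERDICT (by name: the statement is the Claim_ definition above) =====
theorem remove_rolls_spec : Claim_equal_remove_rolls := by
  intro grid rolls _
  unfold Spec_remove_rolls
  show remove_rolls grid rolls =
    (rolls.foldl pvPatch (grid.map (fun row => row.toList.map (fun c => if c = '.' then '.' else '@')))).map String.mk
  rw [pvCanon_base, pvFold_canon, List.nil_append, remove_rolls_canon]
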